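-- pv_equiv track=rewrite | github.com/sosmongare/python | check_duplicate.py | has_duplicate_letters
-- ===== SOURCE A (Python) =====
-- def has_duplicate_letters(sentence):
--     words = sentence.split()
--     for word in words:
--         letter_count = {}
--         for letter in word:
--             if letter in letter_count:
--                 return True  # Found a duplicate letter
--             letter_count[letter] = 1
--     return False  # No duplicate letters found
-- ===== SOURCE B (Python) =====
-- def has_duplicate_letters(sentence):
--     for word in sentence.split():
--         s = sorted(word)
--         if any(a == b for a, b in zip(s, s[1:])):
--             return True
--     return False
-- ===== Notes on version B (the rewrite author's own statement) =====
-- stated objective: alternative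
-- what changed: Replaced A's incremental per-letter dict-membership loop with a sort-then-scan: each word's letters are sorted and a duplicate exists iff some adjacent pair in the sorted order is equal.
import Mathlib
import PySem

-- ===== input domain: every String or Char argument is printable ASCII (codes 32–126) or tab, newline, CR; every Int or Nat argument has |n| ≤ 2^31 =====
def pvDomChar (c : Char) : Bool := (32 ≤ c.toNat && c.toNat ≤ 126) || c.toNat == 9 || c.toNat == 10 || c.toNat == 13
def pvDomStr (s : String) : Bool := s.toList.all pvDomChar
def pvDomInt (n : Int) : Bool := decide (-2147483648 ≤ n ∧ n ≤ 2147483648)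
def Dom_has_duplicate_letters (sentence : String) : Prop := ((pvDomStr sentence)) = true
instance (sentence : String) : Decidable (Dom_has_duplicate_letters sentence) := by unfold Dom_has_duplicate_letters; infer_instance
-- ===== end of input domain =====

-- B replaces A's incremental per-letter dict-membership loop with sort-then-scan:
-- sort each word's letters, a duplicate exists iff some adjacent sorted pair is equal.

-- ===== PORT A =====
-- inner 'for letter in word' loop: returns true on the first letter already in letter_count
def hdlLetters : List Char → PySem.Dict Char Int → Bool
  | [], _ => false
  | c :: rest, d => if d.contains c then true else hdlLetters rest (d.insert c 1)

-- outer 'for word in words' loop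
def hdlWords : List String → Bool
  | [] => false
  | w :: ws => if hdlLetters w.toList PySem.Dict.empty then true else hdlWords ws

def has_duplicate_letters (sentence : String) : Bool :=
  hdlWords (PySem.Str.split₀ sentence)

-- ===== PORT B =====
-- s = sorted(word); any(a == b for a, b in zip(s, s[1:]))  (s[1:] = s.drop 1, exact: slice_from)
def altWordDup (w : String) : Bool :=
  let s := PySem.List.sorted w.toList (fun x => x) false
  (s.zip (s.drop 1)).any (fun p => p.1 == p.2)

def altLoop : List String → Bool
  | [] => false
  | w :: ws => if altWordDup w then true else altLoop ws

def has_duplicate_letters_alt (sentence : String) : Bool :=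
  altLoop (PySem.Str.split₀ sentence)

-- ===== PRECONDITION & SPEC =====
def Spec_has_duplicate_letters (sentence : String) (out : Bool) : Prop := out = has_duplicate_letters_alt sentence
instance (sentence : String) (out : Bool) : Decidable (Spec_has_duplicate_letters sentence out) := by unfold Spec_has_duplicate_letters; infer_instance

-- ===== CLAIM (what is proved, stated in full; the proofs are below) =====
def Claim_equal_has_duplicate_letters : Prop := ∀ (sentence : String), Dom_has_duplicate_letters sentence → Spec_has_duplicate_letters sentence (has_duplicate_letters sentence)

-- ===== LEMMAS AND PROOFS =====

-- A's inner loop returns false iff the remaining letters are distinct and none is already recorded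
theorem hdlLetters_false_iff (l : List Char) : ∀ (d : PySem.Dict Char Int),
    hdlLetters l d = false ↔ (l.Nodup ∧ ∀ c ∈ l, d.contains c = false) := by
  induction l with
  | nil => intro d; simp [hdlLetters]
  | cons c rest ih =>
    intro d
    by_cases h : d.contains c = true
    · simp only [hdlLetters, h, if_true]
      constructor
      · intro hfalse; cases hfalse
      · rintro ⟨-, hall⟩
        have := hall c (by simp)
        simp [h] at this
    · have hc : d.contains c = false := by
        cases hcc : d.contains c
        · rfl
        · exact absurd hcc h
      simp only [hdlLetters, hc, Bool.false_eq_true, if_false]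
      rw [ih]
      constructor
      · rintro ⟨hnd, hall⟩
        have hcnot : c ∉ rest := by
          intro hmem
          have := hall c hmem
          rw [PySem.Dict.contains_insert] at this
          simp at this
        refine ⟨List.nodup_cons.mpr ⟨hcnot, hnd⟩, ?_⟩
        intro x hx
        rcases List.mem_cons.mp hx with rfl | hx'
        · exact hc
        · have := hall x hx'
          rw [PySem.Dict.contains_insert] at this
          simp only [Bool.or_eq_false_iff] at this
          exact this.2
      · rintro ⟨hnd, hall⟩
        rcases List.nodup_cons.mp hnd with ⟨hcnot, hnd'⟩
        refine ⟨hnd', ?_⟩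
        intro x hx
        rw [PySem.Dict.contains_insert]
        have hne : x ≠ c := fun h' => hcnot (h' ▸ hx)
        simp [hne, hall x (List.mem_cons_of_mem _ hx)]

theorem hdlLetters_empty (l : List Char) :
    hdlLetters l PySem.Dict.empty = !decide l.Nodup := by
  cases h : hdlLetters l PySem.Dict.empty
  · have := (hdlLetters_false_iff l PySem.Dict.empty).mp h
    simp [this.1]
  · by_cases hnd : l.Nodup
    · have : hdlLetters l PySem.Dict.empty = false :=
        (hdlLetters_false_iff l PySem.Dict.empty).mpr
          ⟨hnd, fun c _ => PySem.Dict.contains_empty c⟩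
      rw [this] at h; cases h
    · simp [hnd]

-- the adjacent-pair scan returns false iff no two neighbours are equal
theorem adjAny_false_iff (s : List Char) :
    ((s.zip (s.drop 1)).any (fun p => p.1 == p.2)) = false ↔ List.IsChain (· ≠ ·) s := by
  induction s with
  | nil => simp
  | cons a t ih =>
    cases t with
    | nil => simp
    | cons b t' =>
      simp only [List.drop_succ_cons, List.drop_zero] at ih ⊢
      simp only [List.zip_cons_cons, List.any_cons, Bool.or_eq_false_iff,
        List.isChain_cons_cons]
      rw [ih]
      simp [beq_eq_false_iff_ne]

theorem isChain_lt_of_ne (s : List Char) (hs : s.Pairwise (· ≤ ·))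
    (hch : List.IsChain (· ≠ ·) s) : List.IsChain (· < ·) s := by
  induction s with
  | nil => exact List.isChain_nil
  | cons a t ih =>
    cases t with
    | nil => exact List.isChain_singleton a
    | cons b t' =>
      rcases List.isChain_cons_cons.mp hch with ⟨hne, hch'⟩
      rcases List.pairwise_cons.mp hs with ⟨hall, hs'⟩
      exact List.isChain_cons_cons.mpr ⟨lt_of_le_of_ne (hall b (by simp)) hne, ih hs' hch'⟩

theorem nodup_isChain_ne (s : List Char) (hnd : s.Nodup) : List.IsChain (· ≠ ·) s := by
  induction s with
  | nil => exact List.isChain_nil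
  | cons a t ih =>
    cases t with
    | nil => exact List.isChain_singleton a
    | cons b t' =>
      rcases List.pairwise_cons.mp hnd with ⟨hall, hnd'⟩
      exact List.isChain_cons_cons.mpr ⟨hall b (by simp), ih hnd'⟩

theorem chain_ne_iff_nodup (s : List Char) (hs : s.Pairwise (· ≤ ·)) :
    List.IsChain (· ≠ ·) s ↔ s.Nodup := by
  constructor
  · intro hch
    have hpw : s.Pairwise (· < ·) :=
      List.isChain_iff_pairwise.mp (isChain_lt_of_ne s hs hch)
    exact List.Pairwise.imp ne_of_lt hpw
  · exact nodup_isChain_ne s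

theorem altWordDup_eq (w : String) :
    altWordDup w = !decide w.toList.Nodup := by
  unfold altWordDup
  set s := PySem.List.sorted w.toList (fun x => x) false with hsdef
  have hperm : s.Perm w.toList := PySem.List.sorted_perm _ _ _
  have hpw : s.Pairwise (· ≤ ·) := PySem.List.sorted_pairwise _ _
  have hiff : ((s.zip (s.drop 1)).any (fun p => p.1 == p.2)) = false ↔ w.toList.Nodup := by
    rw [adjAny_false_iff, chain_ne_iff_nodup s hpw]
    exact hperm.nodup_iff
  cases h : ((s.zip (s.drop 1)).any (fun p => p.1 == p.2))
  · simp [hiff.mp h]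
  · by_cases hnd : w.toList.Nodup
    · rw [hiff.mpr hnd] at h; cases h
    · simp [hnd]

theorem loops_eq (ws : List String) : hdlWords ws = altLoop ws := by
  induction ws with
  | nil => rfl
  | cons w t ih =>
    simp only [hdlWords, altLoop, hdlLetters_empty, altWordDup_eq, ih]

-- ===== VERDICT (by name: the statement is the Claim_ definition above) =====
theorem has_duplicate_letters_spec : Claim_equal_has_duplicate_letters := by
  intro sentence _
  unfold Spec_has_duplicate_letters has_duplicate_letters has_duplicate_letters_alt
  exact loops_eq _
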